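-- pv_equiv track=rewrite | github.com/Levigin/Code_wars_solutions | 5kyu/Pascal's Diagonals.py | generate_diagonal
-- ===== SOURCE A (Python) =====
-- def generate_diagonal(n, l):
--     list_triangle = []
--     res = []
--     for j in range(l + n):
--         list_triangle.append([])
--         list_triangle[j].append(1)
--         for k in range(1, j):
--             list_triangle[j].append(list_triangle[j - 1][k - 1] + list_triangle[j - 1][k])
--         if l != 0 and len(list_triangle) != 1:
--             list_triangle[j].append(1)
--
--     curr = 0
--     for i in range(n, l + n):
--         res.append(list_triangle[i][curr])
--         curr += 1
--
--     return res
-- ===== SOURCE B (Python) =====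
-- def generate_diagonal(n, l):
--     # faster: build C(n+i, i) incrementally via the multiplicative update, O(l)
--     res = []
--     c = 1
--     for i in range(l):
--         res.append(c)
--         c = c * (n + i + 1) // (i + 1)
--     return res
-- ===== Notes on version B (the rewrite author's own statement) =====
-- stated objective: faster
-- what changed: Replaces building the full Pascal triangle row by row with a single O(l) loop that computes each diagonal entry C(n+i,i) from the previous one by the multiplicative update c = c*(n+i+1)//(i+1).
import Mathlib
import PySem

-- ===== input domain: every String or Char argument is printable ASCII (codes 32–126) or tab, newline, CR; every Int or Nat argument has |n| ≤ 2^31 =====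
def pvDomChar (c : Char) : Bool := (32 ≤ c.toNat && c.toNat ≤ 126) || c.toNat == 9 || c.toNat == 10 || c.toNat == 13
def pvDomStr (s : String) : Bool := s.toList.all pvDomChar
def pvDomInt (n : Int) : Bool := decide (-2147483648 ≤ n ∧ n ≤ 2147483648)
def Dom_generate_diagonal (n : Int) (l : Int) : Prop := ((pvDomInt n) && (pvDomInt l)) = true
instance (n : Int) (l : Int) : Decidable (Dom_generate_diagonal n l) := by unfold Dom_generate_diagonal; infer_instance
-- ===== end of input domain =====

-- B replaces A's row-by-row construction of Pascal's triangle with one loop that updates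
-- the diagonal entry multiplicatively; a timing run reports the measured speed-up.

-- ===== PORT A =====
-- body of A's triangle-building loop 'for j in range(l + n)'
def gdStepA (l : Int) (tri : List (List Int)) (j : Int) : List (List Int) :=
  let prev := (PySem.List.pyGet? tri (j - 1)).getD []
  let row := (PySem.List.pyRange 1 j 1).foldl
      (fun row k =>
        row ++ [((PySem.List.pyGet? prev (k - 1)).getD 0) + ((PySem.List.pyGet? prev k).getD 0)])
      [1]
  let row := if l ≠ 0 ∧ tri.length + 1 ≠ 1 then row ++ [1] else row
  tri ++ [row]

-- A's second loop 'for i in range(n, l + n)' with the running index 'curr'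
def gdRes (n : Int) (l : Int) (tri : List (List Int)) : List Int :=
  ((PySem.List.pyRange n (l + n) 1).foldl
      (fun (p : List Int × Int) i =>
        (p.1 ++ [(PySem.List.pyGet? ((PySem.List.pyGet? tri i).getD []) p.2).getD 0], p.2 + 1))
      ([], 0)).1

def generate_diagonal (n : Int) (l : Int) : List Int :=
  gdRes n l ((PySem.List.pyRange 0 (l + n) 1).foldl (gdStepA l) [])

-- ===== PORT B =====
def generate_diagonal_alt (n : Int) (l : Int) : List Int :=
  ((PySem.List.pyRange 0 l 1).foldl
      (fun (p : List Int × Int) i =>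
        (p.1 ++ [p.2], PySem.Int.floordiv (p.2 * (n + i + 1)) (i + 1)))
      ([], 1)).1

-- ===== PRECONDITION & SPEC =====
-- Pre_ excludes exactly the inputs on which A raises IndexError: l ≥ 1 with negative n
-- (negative-index access into the triangle), and l = 0 with n ≥ 3 (the 'if l != 0' guard
-- leaves the rows truncated, so row 2 indexes past the end of row 1).
def Pre_generate_diagonal (n : Int) (l : Int) : Prop :=
  (1 ≤ l ∧ 0 ≤ n) ∨ l ≤ -1 ∨ (l = 0 ∧ n ≤ 2)
instance (n : Int) (l : Int) : Decidable (Pre_generate_diagonal n l) := by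
  unfold Pre_generate_diagonal; infer_instance

def pvWitness_generate_diagonal : Int × Int := (2, 4)

def Spec_generate_diagonal (n : Int) (l : Int) (out : List Int) : Prop := out = generate_diagonal_alt n l
instance (n : Int) (l : Int) (out : List Int) : Decidable (Spec_generate_diagonal n l out) := by
  unfold Spec_generate_diagonal; infer_instance

-- ===== CLAIM (what is proved, stated in full; the proofs are below) =====
def Claim_equal_generate_diagonal : Prop := ∀ (n : Int) (l : Int), Dom_generate_diagonal n l → Pre_generate_diagonal n l → Spec_generate_diagonal n l (generate_diagonal n l)

-- ===== LEMMAS AND PROOFS =====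

-- the j-th row of Pascal's triangle, [C(j,0), …, C(j,j)]
def pascalRow (j : Nat) : List Int := (List.range (j + 1)).map (fun k => ((j.choose k : Nat) : Int))

-- the reference value of the diagonal
def diagSpec (n l : Nat) : List Int := (List.range l).map (fun t => (((n + t).choose t : Nat) : Int))

theorem pyGet?_pascalRow (j k : Nat) (h : k ≤ j) :
    PySem.List.pyGet? (pascalRow j) ((k : Nat) : Int) = some ((j.choose k : Nat) : Int) := by
  rw [PySem.List.pyGet?_natCast]
  simp [pascalRow, Nat.lt_succ_of_le h]

theorem alt_nonpos (n l : Int) (h : l ≤ 0) : generate_diagonal_alt n l = [] := by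
  unfold generate_diagonal_alt
  rw [PySem.List.pyRange_one_eq_nil (by omega)]
  rfl

theorem a_nonpos (n l : Int) (h : l ≤ 0) : generate_diagonal n l = [] := by
  unfold generate_diagonal gdRes
  rw [show PySem.List.pyRange n (l + n) 1 = [] from PySem.List.pyRange_one_eq_nil (by omega)]
  rfl

-- B's loop invariant: after i iterations the result holds C(n,0)…C(n+i-1,i-1) and
-- the accumulator holds C(n+i,i)
theorem altLoop (n : Nat) (m : Nat) :
    ((List.range m).map (fun k => ((k : Nat) : Int))).foldl
      (fun (p : List Int × Int) i =>
        (p.1 ++ [p.2], PySem.Int.floordiv (p.2 * ((n : Int) + i + 1)) (i + 1)))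
      ([], 1)
    = (diagSpec n m, (((n + m).choose m : Nat) : Int)) := by
  induction m with
  | zero => simp [diagSpec]
  | succ m ih =>
    rw [List.range_succ, List.map_append, List.foldl_append, ih]
    simp only [List.map_cons, List.map_nil, List.foldl_cons, List.foldl_nil]
    rw [Prod.mk.injEq]
    constructor
    · simp [diagSpec, List.range_succ]
    · have h : ((n + m).choose m : Int) * ((n : Int) + (m : Int) + 1)
          = (((n + m).choose m * (n + m + 1) : Nat) : Int) := by push_cast; ring
      rw [h, show ((m : Int) + 1) = ((m + 1 : Nat) : Int) by push_cast; ring,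
        PySem.Int.floordiv_natCast]
      congr 1
      rw [mul_comm, Nat.add_one_mul_choose_eq]
      rw [Nat.mul_div_cancel _ (Nat.succ_pos m)]
      congr 1

theorem alt_eq_diagSpec (n l : Nat) :
    generate_diagonal_alt ((n : Nat) : Int) ((l : Nat) : Int) = diagSpec n l := by
  unfold generate_diagonal_alt
  rw [PySem.List.pyRange_zero_nat, altLoop]

-- one step of A's triangle loop sends the first m Pascal rows to the first m+1 rows
theorem gdStepA_pascal (l : Int) (hl : l ≠ 0) (m : Nat) :
    gdStepA l ((List.range m).map pascalRow) ((m : Nat) : Int)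
      = (List.range (m + 1)).map pascalRow := by
  cases m with
  | zero => simp [gdStepA, pascalRow]
  | succ m =>
    have hprev : (PySem.List.pyGet? ((List.range (m + 1)).map pascalRow) (((m + 1 : Nat) : Int) - 1)).getD []
        = pascalRow m := by
      rw [show (((m + 1 : Nat) : Int) - 1) = ((m : Nat) : Int) by push_cast; ring,
        PySem.List.pyGet?_natCast]
      simp
    simp only [gdStepA, hprev, PySem.List.foldl_append_singleton_eq_map]
    have hcond : (l ≠ 0 ∧ ((List.range (m + 1)).map pascalRow).length + 1 ≠ 1) :=
      ⟨hl, by simp⟩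
    rw [if_pos hcond]
    have hrange : PySem.List.pyRange 1 ((m + 1 : Nat) : Int) 1
        = (List.range m).map (fun t => (1 : Int) + (t : Nat)) := by
      rw [PySem.List.pyRange_one,
        show (((m + 1 : Nat) : Int) - 1).toNat = m by omega]
    rw [hrange, List.map_map]
    have hmid : (List.range m).map
          ((fun k => (PySem.List.pyGet? (pascalRow m) (k - 1)).getD 0
              + (PySem.List.pyGet? (pascalRow m) k).getD 0) ∘ (fun t => (1 : Int) + (t : Nat)))
        = (List.range m).map (fun t => (((m + 1).choose (t + 1) : Nat) : Int)) := by
      apply List.map_congr_left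
      intro t ht
      have ht' : t < m := List.mem_range.mp ht
      simp only [Function.comp]
      rw [show ((1 : Int) + (t : Nat) - 1) = ((t : Nat) : Int) by ring,
        show ((1 : Int) + (t : Nat)) = ((t + 1 : Nat) : Int) by push_cast; ring,
        PySem.List.pyGet?_natCast, PySem.List.pyGet?_natCast]
      have h1 : t < m + 1 := by omega
      have h2 : t + 1 < m + 1 := by omega
      simp [pascalRow, h1, h2, Nat.choose_succ_succ']
    rw [hmid]
    rw [show List.range (m + 1 + 1) = List.range (m + 1) ++ [m + 1] from List.range_succ,
      List.map_append]
    congr 1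
    simp only [List.map_cons, List.map_nil]
    congr 1
    rw [pascalRow, show List.range (m + 1 + 1) = List.range (m + 1) ++ [m + 1] from List.range_succ,
      List.map_append, show List.range (m + 1) = 0 :: (List.range m).map Nat.succ from List.range_succ_eq_map,
      List.map_cons, List.map_map]
    simp [Nat.choose_succ_succ]

-- A's triangle after the whole first loop is exactly the first T Pascal rows
theorem triLoop (l : Int) (hl : l ≠ 0) (T : Nat) :
    ((List.range T).map (fun k => ((k : Nat) : Int))).foldl (gdStepA l) []
      = (List.range T).map pascalRow := by
  induction T with
  | zero => simp
  | succ T ih =>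
    rw [List.range_succ, List.map_append, List.foldl_append, ih]
    simp only [List.map_cons, List.map_nil, List.foldl_cons, List.foldl_nil]
    rw [gdStepA_pascal l hl T, List.range_succ]

-- A's second loop reads tri[n+t][t] = C(n+t,t) for t < m
theorem resLoop (n l : Nat) (m : Nat) (hm : m ≤ l) :
    ((List.range m).map (fun t => ((n : Nat) : Int) + ((t : Nat) : Int))).foldl
      (fun (p : List Int × Int) i =>
        (p.1 ++ [(PySem.List.pyGet? ((PySem.List.pyGet? ((List.range (l + n)).map pascalRow) i).getD []) p.2).getD 0], p.2 + 1))
      ([], 0)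
    = (diagSpec n m, ((m : Nat) : Int)) := by
  induction m with
  | zero => simp [diagSpec]
  | succ m ih =>
    rw [List.range_succ, List.map_append, List.foldl_append, ih (by omega)]
    simp only [List.map_cons, List.map_nil, List.foldl_cons, List.foldl_nil]
    have hi : ((n : Nat) : Int) + ((m : Nat) : Int) = ((n + m : Nat) : Int) := by push_cast; ring
    have htri : (PySem.List.pyGet? ((List.range (l + n)).map pascalRow) ((n + m : Nat) : Int)).getD []
        = pascalRow (n + m) := by
      rw [PySem.List.pyGet?_natCast]
      have : n + m < l + n := by omega
      simp [this]
    rw [Prod.mk.injEq]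
    constructor
    · rw [hi, htri, pyGet?_pascalRow (n + m) m (by omega)]
      simp [diagSpec, List.range_succ]
    · push_cast; ring

theorem a_eq_diagSpec (n l : Nat) (hl : 1 ≤ l) :
    generate_diagonal ((n : Nat) : Int) ((l : Nat) : Int) = diagSpec n l := by
  unfold generate_diagonal
  have h1 : ((l : Nat) : Int) + ((n : Nat) : Int) = ((l + n : Nat) : Int) := by push_cast; ring
  rw [h1, PySem.List.pyRange_zero_nat, triLoop _ (by exact_mod_cast by omega : ((l : Nat) : Int) ≠ 0) (l + n)]
  unfold gdRes
  rw [h1, show PySem.List.pyRange ((n : Nat) : Int) ((l + n : Nat) : Int) 1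
      = (List.range l).map (fun t => ((n : Nat) : Int) + ((t : Nat) : Int)) by
    rw [PySem.List.pyRange_one, show (((l + n : Nat) : Int) - ((n : Nat) : Int)).toNat = l by omega]]
  rw [resLoop n l l le_rfl]

-- ===== VERDICT (by name: the statement is the Claim_ definition above) =====
theorem generate_diagonal_spec : Claim_equal_generate_diagonal := by
  intro n l _ hpre
  unfold Spec_generate_diagonal
  rcases hpre with ⟨hl, hn⟩ | hl | ⟨hl, _⟩
  · obtain ⟨n', rfl⟩ : ∃ m : Nat, n = (m : Int) := ⟨n.toNat, (Int.toNat_of_nonneg hn).symm⟩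
    obtain ⟨l', rfl⟩ : ∃ m : Nat, l = (m : Int) := ⟨l.toNat, (Int.toNat_of_nonneg (by omega)).symm⟩
    rw [a_eq_diagSpec n' l' (by exact_mod_cast hl), alt_eq_diagSpec]
  · rw [a_nonpos n l (by omega), alt_nonpos n l (by omega)]
  · rw [a_nonpos n l (by omega), alt_nonpos n l (by omega)]
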